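-- pv_equiv track=rewrite | github.com/hksawczuk/grahamtools | examples/search_permanent_null.py | gamma_sequence
-- ===== SOURCE A (Python) =====
-- from collections import defaultdict
--
-- def line_graph(edges, n_vertices):
--     m = len(edges)
--     if m == 0:
--         return [], 0
--     incident = defaultdict(list)
--     for idx, (u, v) in enumerate(edges):
--         incident[u].append(idx)
--         incident[v].append(idx)
--     new_edges = set()
--     for v, inc in incident.items():
--         for i in range(len(inc)):
--             for j in range(i + 1, len(inc)):
--                 a, b = inc[i], inc[j]
--                 if a > b: a, b = b, a
--                 new_edges.add((a, b))
--     return sorted(new_edges), m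
--
-- def gamma_sequence(edges, max_k, max_edges=1_000_000):
--     if not edges:
--         return [0] * (max_k + 1)
--     verts = set()
--     for u, v in edges:
--         verts.add(u)
--         verts.add(v)
--     n = len(verts)
--     v_map = {v: i for i, v in enumerate(sorted(verts))}
--     current_edges = [(v_map[u], v_map[v]) for u, v in edges]
--     current_n = n
--     seq = [current_n]
--     for k in range(1, max_k + 1):
--         new_edges, new_n = line_graph(current_edges, current_n)
--         seq.append(new_n)
--         if new_n == 0 or len(new_edges) > max_edges:
--             while len(seq) <= max_k:
--                 seq.append(None)
--             break
--         current_edges = new_edges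
--         current_n = new_n
--     return seq
-- ===== SOURCE B (Python) =====
-- def _line_graph_pairs(edges):
--     # Pairwise scan: for i < j, edges i and j are adjacent in the line graph
--     # iff they share an endpoint; a self-loop edge (u, u) is adjacent to itself.
--     # Emitting (i, i) first and then (i, j) for increasing j yields the pairs
--     # already in lexicographic order with no duplicates, so no set/sort needed.
--     m = len(edges)
--     out = []
--     for i in range(m):
--         u, v = edges[i]
--         if u == v:
--             out.append((i, i))
--         for j in range(i + 1, m):
--             x, y = edges[j]
--             if u == x or u == y or v == x or v == y:
--                 out.append((i, j))
--     return out, m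
--
--
-- def gamma_sequence(edges, max_k, max_edges=1_000_000):
--     if not edges:
--         return [0] * (max_k + 1)
--     vs = sorted({w for e in edges for w in e})
--     idx = {v: i for i, v in enumerate(vs)}
--     cur = [(idx[u], idx[v]) for u, v in edges]
--     seq = [len(vs)]
--     for _ in range(max_k):
--         new, m = _line_graph_pairs(cur)
--         seq.append(m)
--         if m == 0 or len(new) > max_edges:
--             return seq + [None] * (max_k + 1 - len(seq))
--         cur = new
--     return seq
-- ===== Notes on version B (the rewrite author's own statement) =====
-- stated objective: alternative
-- what changed: line_graph is recomputed by a pairwise scan over edge-index pairs i<j testing shared endpoints (self-loops giving (i,i)), which emits the new edges already in lexicographic order so the incident-vertex dictionary, the set and the sort all disappear; the None-padding becomes one arithmetic list extension instead of a while loop.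
import Mathlib
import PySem

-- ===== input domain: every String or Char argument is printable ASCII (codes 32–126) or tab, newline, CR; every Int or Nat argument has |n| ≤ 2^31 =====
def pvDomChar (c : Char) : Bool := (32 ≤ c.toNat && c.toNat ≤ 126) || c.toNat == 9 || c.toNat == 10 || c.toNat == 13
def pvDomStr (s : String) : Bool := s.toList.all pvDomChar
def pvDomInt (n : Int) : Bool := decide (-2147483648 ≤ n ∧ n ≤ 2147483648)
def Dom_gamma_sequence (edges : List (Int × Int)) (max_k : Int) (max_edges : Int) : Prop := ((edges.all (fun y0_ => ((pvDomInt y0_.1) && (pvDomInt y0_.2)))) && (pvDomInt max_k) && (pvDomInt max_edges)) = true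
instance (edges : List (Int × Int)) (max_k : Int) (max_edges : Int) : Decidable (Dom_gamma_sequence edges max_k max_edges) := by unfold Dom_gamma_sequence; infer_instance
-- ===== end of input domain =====

-- B replaces the incident-dictionary line_graph by a pairwise scan over edge-index
-- pairs that emits the new edges already in lexicographic order (no dict/set/sort),
-- and the while-loop None-padding by one arithmetic list extension ('alternative').

-- ===== PORT A =====
-- line_graph(edges, n_vertices) from A (n_vertices is accepted and unused, as in the Python)
def lineGraphA (edges : List (Int × Int)) (_n_vertices : Int) : List (Int × Int) × Int :=
  let m := edges.length
  if m == 0 then ([], 0)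
  else
    let incident : PySem.Dict Int (List Int) :=
      (PySem.List.enumerate edges).foldl
        (fun d p => ((d.modify p.2.1 [] (fun l => l ++ [p.1])).modify p.2.2 [] (fun l => l ++ [p.1])))
        PySem.Dict.empty
    let new_edges : PySem.Set (Int × Int) :=
      incident.items.foldl
        (fun s pr =>
          (PySem.List.pyRange 0 (pr.2.length : Int)).foldl
            (fun s i =>
              (PySem.List.pyRange (i + 1) (pr.2.length : Int)).foldl
                (fun s j =>
                  let a := PySem.List.pyGetD pr.2 i 0
                  let b := PySem.List.pyGetD pr.2 j 0
                  if a > b then PySem.Set.add s (b, a) else PySem.Set.add s (a, b))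
                s)
            s)
        PySem.Set.empty
    (PySem.List.sorted2 new_edges Prod.fst Prod.snd, (m : Int))

-- 'while len(seq) <= max_k: seq.append(None)'
def padA (max_k : Int) (seq : List (Option Int)) : List (Option Int) :=
  if (seq.length : Int) ≤ max_k then padA max_k (seq ++ [none]) else seq
termination_by (max_k + 1 - seq.length).toNat
decreasing_by simp only [List.length_append, List.length_cons, List.length_nil]; omega

-- 'for k in range(1, max_k + 1): …' with the break
def gammaLoopA : Nat → Int → Int → List (Int × Int) → Int → List (Option Int) → List (Option Int)
  | 0, _, _, _, _, seq => seq
  | steps + 1, max_k, max_edges, cur, cur_n, seq =>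
      let r := lineGraphA cur cur_n
      let seq := seq ++ [some r.2]
      if r.2 == 0 || (r.1.length : Int) > max_edges then padA max_k seq
      else gammaLoopA steps max_k max_edges r.1 r.2 seq

def gamma_sequence (edges : List (Int × Int)) (max_k : Int) (max_edges : Int) : List (Option Int) :=
  if edges.isEmpty then List.replicate (max_k + 1).toNat (some 0)
  else
    let verts : PySem.Set Int :=
      edges.foldl (fun s e => PySem.Set.add (PySem.Set.add s e.1) e.2) PySem.Set.empty
    let n : Int := verts.length
    let v_map : PySem.Dict Int Int :=
      (PySem.List.enumerate (PySem.List.sorted verts (fun v => v))).foldl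
        (fun d p => d.insert p.2 p.1) PySem.Dict.empty
    let current_edges := edges.map (fun e => (v_map.getD e.1 0, v_map.getD e.2 0))
    gammaLoopA max_k.toNat max_k max_edges current_edges n [some n]

-- ===== PORT B =====
-- _line_graph_pairs from Source B: pairwise scan, output already lexicographically ordered
def lineGraphB (edges : List (Int × Int)) : List (Int × Int) × Int :=
  let m := edges.length
  let out : List (Int × Int) :=
    (PySem.List.pyRange 0 (m : Int)).foldl
      (fun out i =>
        let e := PySem.List.pyGetD edges i (0, 0)
        let out := if e.1 == e.2 then out ++ [(i, i)] else out
        (PySem.List.pyRange (i + 1) (m : Int)).foldl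
          (fun out j =>
            let f := PySem.List.pyGetD edges j (0, 0)
            if e.1 == f.1 || e.1 == f.2 || e.2 == f.1 || e.2 == f.2 then out ++ [(i, j)] else out)
          out)
      []
  (out, (m : Int))

-- 'for _ in range(max_k): …' with the early return
def gammaLoopB : Nat → Int → Int → List (Int × Int) → List (Option Int) → List (Option Int)
  | 0, _, _, _, seq => seq
  | fuel + 1, max_k, max_edges, cur, seq =>
      let r := lineGraphB cur
      let seq := seq ++ [some r.2]
      if r.2 == 0 || (r.1.length : Int) > max_edges then
        seq ++ List.replicate (max_k + 1 - seq.length).toNat none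
      else gammaLoopB fuel max_k max_edges r.1 seq

def gamma_sequence_alt (edges : List (Int × Int)) (max_k : Int) (max_edges : Int) : List (Option Int) :=
  if edges == [] then List.replicate (max_k + 1).toNat (some 0)
  else
    let vs : List Int :=
      PySem.List.sorted (PySem.Set.ofList (edges.flatMap (fun e => [e.1, e.2]))) (fun v => v)
    let idx : PySem.Dict Int Int :=
      (PySem.List.enumerate vs).foldl (fun d p => d.insert p.2 p.1) PySem.Dict.empty
    let cur := edges.map (fun e => (idx.getD e.1 0, idx.getD e.2 0))
    gammaLoopB max_k.toNat max_k max_edges cur [some (vs.length : Int)]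

-- ===== PRECONDITION & SPEC =====
def Spec_gamma_sequence (edges : List (Int × Int)) (max_k : Int) (max_edges : Int) (out : List (Option Int)) : Prop := out = gamma_sequence_alt edges max_k max_edges
instance (edges : List (Int × Int)) (max_k : Int) (max_edges : Int) (out : List (Option Int)) : Decidable (Spec_gamma_sequence edges max_k max_edges out) := by unfold Spec_gamma_sequence; infer_instance

-- ===== CLAIM (what is proved, stated in full; the proofs are below) =====
def Claim_equal_gamma_sequence : Prop := ∀ (edges : List (Int × Int)) (max_k : Int) (max_edges : Int), Dom_gamma_sequence edges max_k max_edges → Spec_gamma_sequence edges max_k max_edges (gamma_sequence edges max_k max_edges)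

-- ===== LEMMAS AND PROOFS =====

-- generic: membership through a foldl whose step adds by a predicate
theorem pvMemFoldl {α β : Type} (step : List α → β → List α) (P : β → α → Prop)
    (h : ∀ s x y, y ∈ step s x ↔ y ∈ s ∨ P x y) :
    ∀ (l : List β) (s : List α) (y : α), y ∈ l.foldl step s ↔ y ∈ s ∨ ∃ x ∈ l, P x y := by
  intro l
  induction l with
  | nil => simp
  | cons b t ih =>
      intro s y
      simp only [List.foldl_cons, ih, h, List.mem_cons]
      constructor
      · rintro ((hy | hp) | ⟨x, hx, hp⟩)
        · exact Or.inl hy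
        · exact Or.inr ⟨b, Or.inl rfl, hp⟩
        · exact Or.inr ⟨x, Or.inr hx, hp⟩
      · rintro (hy | ⟨x, (rfl | hx), hp⟩)
        · exact Or.inl (Or.inl hy)
        · exact Or.inl (Or.inr hp)
        · exact Or.inr ⟨x, hx, hp⟩

theorem pvNodupFoldl {α β : Type} (step : List α → β → List α)
    (h : ∀ s x, s.Nodup → (step s x).Nodup) :
    ∀ (l : List β) (s : List α), s.Nodup → (l.foldl step s).Nodup := by
  intro l
  induction l with
  | nil => intro s hs; exact hs
  | cons b t ih => intro s hs; exact ih _ (h s b hs)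

def pvL' (e : List (Int × Int)) : List (Int × Int) :=
  (PySem.List.enumerate e).flatMap (fun p => [(p.2.1, p.1), (p.2.2, p.1)])

def pvIncident (e : List (Int × Int)) : PySem.Dict Int (List Int) :=
  (PySem.List.enumerate e).foldl
    (fun d p => ((d.modify p.2.1 [] (fun l => l ++ [p.1])).modify p.2.2 [] (fun l => l ++ [p.1])))
    PySem.Dict.empty

def pvInc (e : List (Int × Int)) (v : Int) : List Int :=
  ((pvL' e).filter (fun q => q.1 == v)).map (fun q => q.2)

theorem pvIncident_eq (e : List (Int × Int)) :
    pvIncident e = (pvL' e).foldl (fun d q => d.modify q.1 [] (fun l => l ++ [q.2])) PySem.Dict.empty := by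
  unfold pvIncident pvL'
  rw [List.foldl_flatMap]
  rfl

theorem pvGetD_pvIncident (e : List (Int × Int)) (v : Int) :
    (pvIncident e).getD v [] = pvInc e v := by
  rw [pvIncident_eq, PySem.Dict.getD_foldl_modify_append, PySem.Dict.getD_empty]
  rfl

theorem pvKeys_pvIncident (e : List (Int × Int)) :
    (pvIncident e).keys = PySem.Set.ofList ((pvL' e).map (fun q => q.1)) := by
  rw [pvIncident_eq]
  rw [PySem.Dict.keys_foldl_modify_key (pvL' e) (fun q => q.1) [] (fun _ q l => l ++ [q.2]) PySem.Dict.empty]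
  rfl

theorem pvNodupKeys_pvIncident (e : List (Int × Int)) : (pvIncident e).keys.Nodup := by
  rw [pvIncident_eq]
  exact PySem.Dict.nodup_keys_foldl_modify_key _ _ _ _ _ PySem.Dict.nodup_keys_empty

theorem pvItems_pvIncident (e : List (Int × Int)) :
    (pvIncident e).items = (pvIncident e).keys.map (fun v => (v, pvInc e v)) := by
  rw [PySem.Dict.items_eq_map_keys _ (pvNodupKeys_pvIncident e) []]
  simp [pvGetD_pvIncident]

def pvBlk (v : Int) (p : Int × (Int × Int)) : List Int :=
  (if p.2.1 = v then [p.1] else []) ++ (if p.2.2 = v then [p.1] else [])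

theorem pvInc_flatMap (e : List (Int × Int)) (v : Int) :
    pvInc e v = (PySem.List.enumerate e).flatMap (pvBlk v) := by
  unfold pvInc pvL'
  rw [List.filter_flatMap, List.map_flatMap]
  congr 1
  funext p
  rcases p with ⟨k, u, w⟩
  by_cases h1 : u = v <;> by_cases h2 : w = v <;> simp [pvBlk, h1, h2]

theorem pvMem_blk {v : Int} {p : Int × (Int × Int)} {a : Int} :
    a ∈ pvBlk v p ↔ a = p.1 ∧ (p.2.1 = v ∨ p.2.2 = v) := by
  rcases p with ⟨k, u, w⟩
  unfold pvBlk
  by_cases h1 : u = v <;> by_cases h2 : w = v <;> simp [h1, h2]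

theorem pvMem_pvInc {e : List (Int × Int)} {v a : Int} :
    a ∈ pvInc e v ↔ ∃ (k : Nat), ∃ (_ : k < e.length), a = (k : Int) ∧ (e[k].1 = v ∨ e[k].2 = v) := by
  rw [pvInc_flatMap]
  simp only [List.mem_flatMap]
  constructor
  · rintro ⟨p, hp, hm⟩
    rcases (PySem.List.mem_enumerate_iff e 0 p).1 hp with ⟨k, hk, rfl⟩
    rcases pvMem_blk.1 hm with ⟨ha, hv⟩
    exact ⟨k, hk, by simpa using ha, by simpa using hv⟩
  · rintro ⟨k, hk, rfl, hv⟩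
    refine ⟨((k : Int), e[k]), (PySem.List.mem_enumerate_iff e 0 _).2 ⟨k, hk, by simp⟩, pvMem_blk.2 ⟨by simp, hv⟩⟩

def pvR (e : List (Int × Int)) (v : Int) (x y : Int) : Prop :=
  x < y ∨ (x = y ∧ ∃ (k : Nat), ∃ (_ : k < e.length), x = (k : Int) ∧ e[k] = (v, v))

theorem pvPairwise_pvInc (e : List (Int × Int)) (v : Int) :
    (pvInc e v).Pairwise (pvR e v) := by
  rw [pvInc_flatMap]
  rw [List.pairwise_flatMap]
  constructor
  · rintro p hp
    rcases p with ⟨k, u, w⟩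
    rcases (PySem.List.mem_enumerate_iff e 0 _).1 hp with ⟨k', hk', hpe⟩
    have hk : k = (k' : Int) := by injection hpe with h1 h2; simpa using h1
    have he : (u, w) = e[k'] := by injection hpe
    subst hk
    unfold pvBlk
    by_cases h1 : u = v <;> by_cases h2 : w = v <;> simp [h1, h2, pvR]
    · subst h1; subst h2
      exact ⟨hk', he.symm⟩
  · have hpw := PySem.List.pairwise_lt_enumerate (xs := e) (s := 0)
    refine hpw.imp ?_
    rintro p q hlt x hx y hy
    rcases pvMem_blk.1 hx with ⟨rfl, _⟩
    rcases pvMem_blk.1 hy with ⟨rfl, _⟩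
    exact Or.inl hlt

def pvNorm (a b : Int) : Int × Int := if a > b then (b, a) else (a, b)

def pvSet (e : List (Int × Int)) : PySem.Set (Int × Int) :=
  (pvIncident e).items.foldl
    (fun s pr =>
      (PySem.List.pyRange 0 (pr.2.length : Int)).foldl
        (fun s i =>
          (PySem.List.pyRange (i + 1) (pr.2.length : Int)).foldl
            (fun s j =>
              let a := PySem.List.pyGetD pr.2 i 0
              let b := PySem.List.pyGetD pr.2 j 0
              if a > b then PySem.Set.add s (b, a) else PySem.Set.add s (a, b))
            s)
        s)
    PySem.Set.empty

theorem pvMem_inner (pr : Int × List Int) (s : PySem.Set (Int × Int)) (y : Int × Int) :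
    y ∈ (PySem.List.pyRange 0 (pr.2.length : Int)).foldl
        (fun s i =>
          (PySem.List.pyRange (i + 1) (pr.2.length : Int)).foldl
            (fun s j =>
              let a := PySem.List.pyGetD pr.2 i 0
              let b := PySem.List.pyGetD pr.2 j 0
              if a > b then PySem.Set.add s (b, a) else PySem.Set.add s (a, b))
            s)
        s
      ↔ y ∈ s ∨ ∃ i ∈ PySem.List.pyRange 0 (pr.2.length : Int),
          ∃ j ∈ PySem.List.pyRange (i + 1) (pr.2.length : Int),
            y = pvNorm (PySem.List.pyGetD pr.2 i 0) (PySem.List.pyGetD pr.2 j 0) := by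
  rw [pvMemFoldl _ (fun i y => ∃ j ∈ PySem.List.pyRange (i + 1) (pr.2.length : Int),
        y = pvNorm (PySem.List.pyGetD pr.2 i 0) (PySem.List.pyGetD pr.2 j 0))]
  intro s i y
  rw [pvMemFoldl _ (fun j y => y = pvNorm (PySem.List.pyGetD pr.2 i 0) (PySem.List.pyGetD pr.2 j 0))]
  intro s j y
  simp only [pvNorm]
  split <;> simp [PySem.Set.mem_add]

theorem pvMem_pvSet_raw (e : List (Int × Int)) (y : Int × Int) :
    y ∈ pvSet e ↔ ∃ pr ∈ (pvIncident e).items,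
        ∃ i ∈ PySem.List.pyRange 0 (pr.2.length : Int),
          ∃ j ∈ PySem.List.pyRange (i + 1) (pr.2.length : Int),
            y = pvNorm (PySem.List.pyGetD pr.2 i 0) (PySem.List.pyGetD pr.2 j 0) := by
  unfold pvSet
  rw [pvMemFoldl _ (fun pr y => ∃ i ∈ PySem.List.pyRange 0 (pr.2.length : Int),
        ∃ j ∈ PySem.List.pyRange (i + 1) (pr.2.length : Int),
          y = pvNorm (PySem.List.pyGetD pr.2 i 0) (PySem.List.pyGetD pr.2 j 0))]
  · simp
  · exact fun s x y => pvMem_inner x s y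

theorem pvNodup_pvSet (e : List (Int × Int)) : (pvSet e).Nodup := by
  unfold pvSet
  apply pvNodupFoldl
  · intro s pr hs
    apply pvNodupFoldl _ _ _ _ hs
    intro s i hsi
    apply pvNodupFoldl _ _ _ _ hsi
    intro s j hsj
    simp only
    split <;> exact PySem.Set.nodup_add _ _ hsj
  · exact List.nodup_nil

theorem pvMem_pvSet (e : List (Int × Int)) (y : Int × Int) :
    y ∈ pvSet e ↔ ∃ v ∈ (pvIncident e).keys, ∃ pi pj : Nat, pi < pj ∧
        ∃ a b, (pvInc e v)[pi]? = some a ∧ (pvInc e v)[pj]? = some b ∧ y = pvNorm a b := by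
  rw [pvMem_pvSet_raw]
  constructor
  · rintro ⟨pr, hpr, i, hi, j, hj, rfl⟩
    rw [pvItems_pvIncident] at hpr
    rcases List.mem_map.1 hpr with ⟨v, hv, rfl⟩
    rcases (PySem.List.mem_pyRange_one).1 hi with ⟨hi0, hilt⟩
    rcases (PySem.List.mem_pyRange_one).1 hj with ⟨hj0, hjlt⟩
    have h1 : i.toNat < (pvInc e v).length := by simp at hilt ⊢; omega
    have h2 : j.toNat < (pvInc e v).length := by simp at hjlt ⊢; omega
    refine ⟨v, hv, i.toNat, j.toNat, by omega, (pvInc e v)[i.toNat], (pvInc e v)[j.toNat],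
      List.getElem?_eq_getElem h1, List.getElem?_eq_getElem h2, ?_⟩
    rw [PySem.List.pyGetD_of_nonneg _ _ hi0, PySem.List.pyGetD_of_nonneg _ _ (by omega),
      List.getD_eq_getElem _ _ h1, List.getD_eq_getElem _ _ h2]
  · rintro ⟨v, hv, pi, pj, hij, a, b, ha, hb, rfl⟩
    have hpj : pj < (pvInc e v).length := (List.getElem?_eq_some_iff.1 hb).1
    have hpi : pi < (pvInc e v).length := by omega
    refine ⟨(v, pvInc e v), ?_, (pi : Int), ?_, (pj : Int), ?_, ?_⟩
    · rw [pvItems_pvIncident]; exact List.mem_map.2 ⟨v, hv, rfl⟩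
    · rw [PySem.List.mem_pyRange_one]; constructor <;> [positivity; exact_mod_cast hpi]
    · rw [PySem.List.mem_pyRange_one]; constructor <;> [omega; exact_mod_cast hpj]
    · rw [PySem.List.pyGetD_of_nonneg _ _ (by positivity), PySem.List.pyGetD_of_nonneg _ _ (by positivity)]
      simp only [Int.toNat_natCast]
      rw [List.getD_eq_getElem _ _ hpi, List.getD_eq_getElem _ _ hpj]
      rw [List.getElem?_eq_getElem hpi] at ha
      rw [List.getElem?_eq_getElem hpj] at hb
      simp only [Option.some.injEq] at ha hb
      rw [ha, hb]

def pvShareB (e : List (Int × Int)) (i j : Int) : Bool :=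
  let a := PySem.List.pyGetD e i (0, 0)
  let b := PySem.List.pyGetD e j (0, 0)
  a.1 == b.1 || a.1 == b.2 || a.2 == b.1 || a.2 == b.2

def pvBlkB (e : List (Int × Int)) (i : Int) : List (Int × Int) :=
  (if (PySem.List.pyGetD e i (0, 0)).1 == (PySem.List.pyGetD e i (0, 0)).2 then [(i, i)] else []) ++
    ((PySem.List.pyRange (i + 1) (e.length : Int)).filter (fun j => pvShareB e i j)).map (fun j => (i, j))

theorem pvOut_eq (e : List (Int × Int)) :
    (lineGraphB e).1 = (PySem.List.pyRange 0 (e.length : Int)).flatMap (pvBlkB e) := by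
  show (PySem.List.pyRange 0 (e.length : Int)).foldl _ [] = _
  rw [PySem.List.foldl_congr_mem (g := fun out i => out ++ pvBlkB e i)]
  · rw [PySem.List.foldl_append_eq_flatMap]
    simp
  · intro acc i _
    simp only
    rw [PySem.List.foldl_append_if]
    unfold pvBlkB pvShareB
    split <;> simp

def pvLex (p q : Int × Int) : Prop := p.1 < q.1 ∨ (p.1 = q.1 ∧ p.2 < q.2)

theorem pvPyRange_pairwise (a b : Int) : (PySem.List.pyRange a b).Pairwise (· < ·) := by
  generalize hn : (b - a).toNat = n
  induction n generalizing a with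
  | zero =>
      rw [PySem.List.pyRange_one_eq_nil (by omega)]
      exact List.Pairwise.nil
  | succ n ih =>
      rw [PySem.List.pyRange_one_cons (by omega)]
      refine List.Pairwise.cons ?_ (ih (a + 1) (by omega))
      intro x hx
      exact ((PySem.List.mem_pyRange_one).1 hx).1

theorem pvMem_out (e : List (Int × Int)) (q : Int × Int) :
    q ∈ (lineGraphB e).1 ↔ ∃ i : Int, 0 ≤ i ∧ i < (e.length : Int) ∧
      ((q = (i, i) ∧ (PySem.List.pyGetD e i (0, 0)).1 = (PySem.List.pyGetD e i (0, 0)).2) ∨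
        ∃ j : Int, i < j ∧ j < (e.length : Int) ∧ pvShareB e i j = true ∧ q = (i, j)) := by
  rw [pvOut_eq]
  simp only [List.mem_flatMap, PySem.List.mem_pyRange_one, pvBlkB, List.mem_append,
    List.mem_map, List.mem_filter, beq_iff_eq]
  constructor
  · rintro ⟨i, ⟨hi0, hilt⟩, hmem⟩
    refine ⟨i, hi0, hilt, ?_⟩
    rcases hmem with hself | ⟨j, ⟨hj, rfl⟩⟩
    · left
      split at hself
      · simp at hself; exact ⟨hself, by assumption⟩
      · simp at hself
    · right
      exact ⟨j, by omega, hj.1.2, hj.2, rfl⟩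
  · rintro ⟨i, hi0, hilt, hcase⟩
    refine ⟨i, ⟨hi0, hilt⟩, ?_⟩
    rcases hcase with ⟨rfl, hloop⟩ | ⟨j, hij, hjlt, hsh, rfl⟩
    · left; split
      · simp
      · simp_all
    · right
      exact ⟨j, ⟨⟨by omega, hjlt⟩, hsh⟩, rfl⟩

theorem pvFst_blkB {e : List (Int × Int)} {i : Int} {q : Int × Int} (h : q ∈ pvBlkB e i) : q.1 = i := by
  simp only [pvBlkB, List.mem_append, List.mem_map, List.mem_filter] at h
  rcases h with h | ⟨j, _, rfl⟩
  · split at h <;> simp at h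
    · rw [h]
  · rfl

theorem pvPairwise_out (e : List (Int × Int)) : (lineGraphB e).1.Pairwise pvLex := by
  rw [pvOut_eq, List.pairwise_flatMap]
  constructor
  · intro i _
    unfold pvBlkB
    rw [List.pairwise_append]
    refine ⟨?_, ?_, ?_⟩
    · split <;> simp
    · refine List.Pairwise.map _ ?_ (((pvPyRange_pairwise (i + 1) (e.length : Int))).filter _)
      intro a b hab
      exact Or.inr ⟨rfl, hab⟩
    · intro x hx y hy
      split at hx <;> simp at hx
      rcases List.mem_map.1 hy with ⟨j, hj, rfl⟩
      have := ((PySem.List.mem_pyRange_one).1 (List.mem_of_mem_filter hj)).1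
      rw [hx]
      exact Or.inr ⟨rfl, by omega⟩
  · refine (pvPyRange_pairwise 0 (e.length : Int)).imp ?_
    intro a b hab x hx y hy
    rw [pvLex, pvFst_blkB hx, pvFst_blkB hy]
    exact Or.inl hab

theorem pvGet2 {α : Type} (A B : List α) (x y : α) :
    (A ++ x :: y :: B)[A.length]? = some x ∧ (A ++ x :: y :: B)[A.length + 1]? = some y := by
  induction A with
  | nil => simp
  | cons a t ih => simp only [List.cons_append, List.length_cons, List.getElem?_cons_succ]; exact ih

theorem pvGetD_idx (e : List (Int × Int)) (k : Nat) (hk : k < e.length) :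
    PySem.List.pyGetD e (k : Int) (0, 0) = e[k] := by
  rw [PySem.List.pyGetD_of_nonneg _ _ (by positivity), Int.toNat_natCast,
    List.getD_eq_getElem _ _ hk]

theorem pvMem_keys (e : List (Int × Int)) (k : Nat) (hk : k < e.length) (v : Int)
    (hv : e[k].1 = v ∨ e[k].2 = v) : v ∈ (pvIncident e).keys := by
  rw [pvKeys_pvIncident, PySem.Set.mem_ofList]
  simp only [pvL', List.map_flatMap, List.mem_flatMap]
  refine ⟨((k : Int), e[k]), (PySem.List.mem_enumerate_iff e 0 _).2 ⟨k, hk, by simp⟩, ?_⟩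
  simp only [List.map_cons, List.map_nil, List.mem_cons]
  tauto

theorem pvSet_iff_out (e : List (Int × Int)) (q : Int × Int) :
    q ∈ pvSet e ↔ q ∈ (lineGraphB e).1 := by
  rw [pvMem_pvSet, pvMem_out]
  constructor
  · rintro ⟨v, hv, pi, pj, hij, a, b, ha, hb, rfl⟩
    have hpj : pj < (pvInc e v).length := (List.getElem?_eq_some_iff.1 hb).1
    have hpi : pi < (pvInc e v).length := by omega
    have ha' : (pvInc e v)[pi] = a := by rw [List.getElem?_eq_getElem hpi] at ha; exact Option.some.inj ha
    have hb' : (pvInc e v)[pj] = b := by rw [List.getElem?_eq_getElem hpj] at hb; exact Option.some.inj hb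
    have hR : pvR e v a b := by
      have := List.pairwise_iff_getElem.1 (pvPairwise_pvInc e v) pi pj hpi hpj hij
      rwa [ha', hb'] at this
    have hamem : a ∈ pvInc e v := ha' ▸ List.getElem_mem hpi
    have hbmem : b ∈ pvInc e v := hb' ▸ List.getElem_mem hpj
    rcases hR with hlt | ⟨heq, k, hk, hak, hloop⟩
    · rcases pvMem_pvInc.1 hamem with ⟨ka, hka, rfl, hva⟩
      rcases pvMem_pvInc.1 hbmem with ⟨kb, hkb, hbk, hvb⟩
      refine ⟨(ka : Int), by positivity, by exact_mod_cast hka, Or.inr ⟨b, hlt, by omega, ?_, ?_⟩⟩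
      · subst hbk
        simp only [pvShareB, pvGetD_idx e ka hka, pvGetD_idx e kb hkb]
        rcases hva with h1 | h1 <;> rcases hvb with h2 | h2 <;>
          simp [h1, h2]
      · simp [pvNorm, not_lt.2 (le_of_lt hlt)]
    · subst heq
      subst hak
      refine ⟨(k : Int), by positivity, by exact_mod_cast hk, Or.inl ⟨?_, ?_⟩⟩
      · simp [pvNorm]
      · rw [pvGetD_idx e k hk, hloop]
  · rintro ⟨i, hi0, hilt, hcase⟩
    rcases hcase with ⟨rfl, hloop⟩ | ⟨j, hij, hjlt, hsh, rfl⟩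
    · -- self-loop case
      set k := i.toNat with hk
      have hklt : k < e.length := by omega
      have hik : i = (k : Int) := by omega
      rw [hik, pvGetD_idx e k hklt] at hloop
      set v := e[k].1 with hv
      have hvv : e[k] = (v, v) := Prod.ext_iff.2 ⟨rfl, hloop.symm⟩
      -- inc v contains the block [↑k, ↑k]
      have hmem : ((k : Int), e[k]) ∈ PySem.List.enumerate e :=
        (PySem.List.mem_enumerate_iff e 0 _).2 ⟨k, hklt, by simp⟩
      rcases List.append_of_mem hmem with ⟨E1, E2, hsplit⟩
      have hinc : pvInc e v = E1.flatMap (pvBlk v) ++ (k : Int) :: (k : Int) :: E2.flatMap (pvBlk v) := by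
        rw [pvInc_flatMap, hsplit, List.flatMap_append, List.flatMap_cons]
        congr 1
        show pvBlk v ((k : Int), e[k]) ++ _ = _
        rw [hvv]
        simp [pvBlk]
      refine ⟨v, pvMem_keys e k hklt v (Or.inl rfl), (E1.flatMap (pvBlk v)).length,
        (E1.flatMap (pvBlk v)).length + 1, by omega, (k : Int), (k : Int), ?_, ?_, ?_⟩
      · rw [hinc]; exact (pvGet2 _ _ _ _).1
      · rw [hinc]; exact (pvGet2 _ _ _ _).2
      · rw [hik]; simp [pvNorm]
    · -- shared-endpoint case
      set k1 := i.toNat with hk1def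
      set k2 := j.toNat with hk2def
      have hk1 : k1 < e.length := by omega
      have hk2 : k2 < e.length := by omega
      have hik : i = (k1 : Int) := by omega
      have hjk : j = (k2 : Int) := by omega
      rw [hik, hjk] at hsh
      simp only [pvShareB, pvGetD_idx e k1 hk1, pvGetD_idx e k2 hk2, Bool.or_eq_true,
        beq_iff_eq] at hsh
      -- choose the shared vertex
      obtain ⟨v, hv1, hv2⟩ : ∃ v, (e[k1].1 = v ∨ e[k1].2 = v) ∧ (e[k2].1 = v ∨ e[k2].2 = v) := by
        rcases hsh with ((h | h) | h) | h
        · exact ⟨e[k2].1, Or.inl h, Or.inl rfl⟩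
        · exact ⟨e[k2].2, Or.inl h, Or.inr rfl⟩
        · exact ⟨e[k2].1, Or.inr h, Or.inl rfl⟩
        · exact ⟨e[k2].2, Or.inr h, Or.inr rfl⟩
      have himem : i ∈ pvInc e v := by rw [hik]; exact pvMem_pvInc.2 ⟨k1, hk1, rfl, hv1⟩
      have hjmem : j ∈ pvInc e v := by rw [hjk]; exact pvMem_pvInc.2 ⟨k2, hk2, rfl, hv2⟩
      rcases List.mem_iff_getElem.1 himem with ⟨pi, hpi, hgi⟩
      rcases List.mem_iff_getElem.1 hjmem with ⟨pj, hpj, hgj⟩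
      have hpij : pi < pj := by
        rcases Nat.lt_trichotomy pi pj with h | h | h
        · exact h
        · exfalso; subst h; rw [hgi] at hgj; omega
        · exfalso
          have := List.pairwise_iff_getElem.1 (pvPairwise_pvInc e v) pj pi hpj hpi h
          rw [hgi, hgj] at this
          rcases this with h' | ⟨h', _⟩ <;> omega
      refine ⟨v, pvMem_keys e k1 hk1 v hv1, pi, pj, hpij, i, j, ?_, ?_, ?_⟩
      · rw [List.getElem?_eq_getElem hpi, hgi]
      · rw [List.getElem?_eq_getElem hpj, hgj]
      · simp [pvNorm, not_lt.2 (le_of_lt hij)]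

def pvBefore (a b : Int × Int) : Bool :=
  decide (a.1 < b.1) || (!decide (b.1 < a.1) && decide (a.2 < b.2))

theorem pvBefore_iff (a b : Int × Int) : pvBefore a b = true ↔ pvLex a b := by
  rcases a with ⟨a1, a2⟩; rcases b with ⟨b1, b2⟩
  simp [pvBefore, pvLex]
  omega

theorem pvInsertBy_pairwise (x : Int × Int) (ys : List (Int × Int))
    (h : ys.Pairwise (fun a b => ¬ pvLex b a)) :
    (PySem.List.insertBy pvBefore x ys).Pairwise (fun a b => ¬ pvLex b a) := by
  induction ys with
  | nil => simp [PySem.List.insertBy]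
  | cons y ys ih =>
      rw [show PySem.List.insertBy pvBefore x (y :: ys)
          = if pvBefore x y = true then x :: y :: ys else y :: PySem.List.insertBy pvBefore x ys
        from rfl]
      rcases List.pairwise_cons.1 h with ⟨hy, hys⟩
      split
      · rename_i hxy
        rw [pvBefore_iff] at hxy
        refine List.pairwise_cons.2 ⟨?_, h⟩
        intro z hz
        rcases List.mem_cons.1 hz with rfl | hz
        · rcases x with ⟨x1, x2⟩; rcases z with ⟨z1, z2⟩
          simp [pvLex] at hxy ⊢; omega
        · have hyz := hy z hz
          rcases x with ⟨x1, x2⟩; rcases y with ⟨y1, y2⟩; rcases z with ⟨z1, z2⟩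
          simp [pvLex] at hxy hyz ⊢; omega
      · rename_i hxy
        rw [Bool.not_eq_true] at hxy
        have hxy' : ¬ pvLex x y := fun hc => by rw [← pvBefore_iff] at hc; simp [hc] at hxy
        refine List.pairwise_cons.2 ⟨?_, ih hys⟩
        intro z hz
        rcases (PySem.List.mem_insertBy _ _ _ _).1 hz with rfl | hz
        · exact hxy'
        · exact hy z hz

theorem pvSorted2_pairwise (xs : List (Int × Int)) :
    (PySem.List.sorted2 xs Prod.fst Prod.snd).Pairwise (fun a b => ¬ pvLex b a) := by
  show (xs.foldl (fun acc x => PySem.List.insertBy pvBefore x acc) []).Pairwise _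
  have : ∀ (l : List (Int × Int)) (acc : List (Int × Int)),
      acc.Pairwise (fun a b => ¬ pvLex b a) →
      (l.foldl (fun acc x => PySem.List.insertBy pvBefore x acc) acc).Pairwise
        (fun a b => ¬ pvLex b a) := by
    intro l
    induction l with
    | nil => intro acc h; exact h
    | cons x t ih => intro acc h; exact ih _ (pvInsertBy_pairwise x acc h)
  exact this xs [] List.Pairwise.nil

theorem pvSorted2_eq (xs L : List (Int × Int)) (hperm : ∀ q, q ∈ xs ↔ q ∈ L)
    (hnd : xs.Nodup) (hL : L.Pairwise pvLex) :
    PySem.List.sorted2 xs Prod.fst Prod.snd = L := by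
  have hLnd : L.Nodup := hL.imp (fun {a b} h => by
    rcases a with ⟨a1, a2⟩; rcases b with ⟨b1, b2⟩
    simp [pvLex] at h ⊢; omega)
  have hp : xs.Perm L := (List.perm_ext_iff_of_nodup hnd hLnd).2 hperm
  refine List.Perm.eq_of_pairwise (le := fun a b => ¬ pvLex b a) ?_ (pvSorted2_pairwise xs)
    (hL.imp (fun {a b} h => by
      rcases a with ⟨a1, a2⟩; rcases b with ⟨b1, b2⟩
      simp [pvLex] at h ⊢; omega))
    ((PySem.List.sorted2_perm xs Prod.fst Prod.snd false).trans hp)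
  · intro a b _ _ h1 h2
    rcases a with ⟨a1, a2⟩; rcases b with ⟨b1, b2⟩
    simp [pvLex] at h1 h2
    have : a1 = b1 ∧ a2 = b2 := by omega
    simp [this.1, this.2]

theorem lineGraph_eq (edges : List (Int × Int)) (n : Int) :
    lineGraphA edges n = lineGraphB edges := by
  by_cases he : edges = []
  · subst he; rfl
  · have hm : (edges.length == 0) = false := by
      simp [List.length_eq_zero_iff, he]
    show (if edges.length == 0 then (([], 0) : List (Int × Int) × Int)
        else (PySem.List.sorted2 (pvSet edges) Prod.fst Prod.snd, (edges.length : Int)))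
      = lineGraphB edges
    rw [hm]
    simp only [Bool.false_eq_true, if_false]
    have h1 : PySem.List.sorted2 (pvSet edges) Prod.fst Prod.snd = (lineGraphB edges).1 :=
      pvSorted2_eq _ _ (pvSet_iff_out edges) (pvNodup_pvSet edges) (pvPairwise_out edges)
    exact Prod.ext_iff.2 ⟨h1, rfl⟩

theorem padA_eq (max_k : Int) (seq : List (Option Int)) :
    padA max_k seq = seq ++ List.replicate (max_k + 1 - seq.length).toNat none := by
  induction seq using padA.induct (max_k := max_k) with
  | case1 seq h ih =>
    rw [padA, if_pos h, ih]
    have h2 : (max_k + 1 - (seq.length : Int)).toNat = (max_k + 1 - ((seq.length : Int) + 1)).toNat + 1 := by omega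
    simp only [List.length_append, List.length_cons, List.length_nil, h2, List.replicate_succ]
    push_cast
    simp [List.append_assoc]
  | case2 seq h =>
    rw [padA, if_neg h]
    have : (max_k + 1 - (seq.length : Int)).toNat = 0 := by omega
    simp [this]

theorem gammaLoop_eq (fuel : Nat) (max_k max_edges : Int) (cur : List (Int × Int)) (cur_n : Int)
    (seq : List (Option Int)) :
    gammaLoopA fuel max_k max_edges cur cur_n seq = gammaLoopB fuel max_k max_edges cur seq := by
  induction fuel generalizing cur cur_n seq with
  | zero => rfl
  | succ f ih =>
      simp only [gammaLoopA, gammaLoopB, lineGraph_eq]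
      split
      · rw [padA_eq]
      · exact ih _ _ _

theorem verts_eq (edges : List (Int × Int)) :
    edges.foldl (fun s e => PySem.Set.add (PySem.Set.add s e.1) e.2) PySem.Set.empty
      = PySem.Set.ofList (edges.flatMap (fun e => [e.1, e.2])) := by
  rw [PySem.Set.ofList_eq_foldl, List.foldl_flatMap]
  rfl

-- ===== VERDICT (by name: the statement is the Claim_ definition above) =====
theorem gamma_sequence_spec : Claim_equal_gamma_sequence := by
  intro edges max_k max_edges _
  unfold Spec_gamma_sequence gamma_sequence gamma_sequence_alt
  simp only [List.isEmpty_iff, beq_iff_eq]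
  split
  · rfl
  · rw [verts_eq, ← PySem.List.length_sorted (PySem.Set.ofList (edges.flatMap (fun e => [e.1, e.2]))) (fun v => v) false]
    exact gammaLoop_eq _ _ _ _ _ _
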